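-- pv_equiv track=rewrite | github.com/bbobateaa/Messaging-File-Sorting-User-Interface-System | file_class.py | white_space
-- ===== SOURCE A (Python) =====
-- def white_space(user_input):
--     '''
--     Checks for just white space in input and if it does,
--     it will return False
--     '''
--     # function checks for white space
--     count = 0
--     for i in user_input:
--         if i == " ":
--             count += 1
--     if count == len(user_input):
--         return False
--     else:
--         return True
-- ===== SOURCE B (Python) =====
-- def white_space(user_input):
--     # B: one comparison against a same-length all-spaces string; no counting loop.
--     return user_input != " " * len(user_input)
-- ===== Notes on version B (the rewrite author's own statement) =====
-- stated objective: simpler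
-- what changed: Replaces the per-character counting loop and count==len branch with a single comparison of the input against a same-length all-spaces string.
import Mathlib
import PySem

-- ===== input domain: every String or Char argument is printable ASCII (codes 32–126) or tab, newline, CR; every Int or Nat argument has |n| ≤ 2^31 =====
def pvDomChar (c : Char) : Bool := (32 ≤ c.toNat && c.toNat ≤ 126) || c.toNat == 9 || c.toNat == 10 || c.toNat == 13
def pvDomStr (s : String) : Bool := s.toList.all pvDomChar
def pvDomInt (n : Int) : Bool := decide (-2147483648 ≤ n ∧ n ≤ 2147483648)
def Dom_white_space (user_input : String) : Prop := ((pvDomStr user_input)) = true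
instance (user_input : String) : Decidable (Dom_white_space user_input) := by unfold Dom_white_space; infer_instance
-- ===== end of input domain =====

-- B replaces A's counting loop + count==len branch by one comparison with a same-length all-spaces string (simpler).

-- ===== PORT A =====
-- literal port: count spaces in a fold, then compare the count with the length
def white_space (user_input : String) : Bool :=
  let count := user_input.toList.foldl (fun c i => if i = ' ' then c + 1 else c) 0
  if count = user_input.toList.length then false else true

-- ===== PORT B =====
-- literal port of Source B: compare with " " * len(user_input)
def white_space_alt (user_input : String) : Bool :=
  user_input != String.ofList (List.replicate user_input.toList.length ' ')

-- ===== PRECONDITION & SPEC =====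
def Spec_white_space (user_input : String) (out : Bool) : Prop := out = white_space_alt user_input
instance (user_input : String) (out : Bool) : Decidable (Spec_white_space user_input out) := by unfold Spec_white_space; infer_instance

-- ===== CLAIM (what is proved, stated in full; the proofs are below) =====
def Claim_equal_white_space : Prop := ∀ (user_input : String), Dom_white_space user_input → Spec_white_space user_input (white_space user_input)

-- ===== LEMMAS AND PROOFS =====
theorem pv_foldl_count (l : List Char) (n : Nat) :
    l.foldl (fun c i => if i = ' ' then c + 1 else c) n = n + l.count ' ' := by
  induction l generalizing n with
  | nil => simp
  | cons h t ih =>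
    simp only [List.foldl_cons, List.count_cons, ih]
    by_cases hc : h = ' ' <;> simp [hc] <;> try omega

theorem pv_count_iff (l : List Char) :
    (l.foldl (fun c i => if i = ' ' then c + 1 else c) 0 = l.length) ↔
      l = List.replicate l.length ' ' := by
  rw [pv_foldl_count, Nat.zero_add, List.count_eq_length, List.eq_replicate_iff]
  constructor
  · intro h; exact ⟨rfl, fun b hb => (h b hb).symm⟩
  · intro ⟨_, h⟩ b hb; exact (h b hb).symm

-- ===== VERDICT (by name: the statement is the Claim_ definition above) =====
theorem white_space_spec : Claim_equal_white_space := by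
  intro u _
  unfold Spec_white_space white_space white_space_alt
  have key : (u = String.ofList (List.replicate u.toList.length ' '))
      ↔ u.toList = List.replicate u.toList.length ' ' := by
    rw [← String.toList_inj]; simp
  by_cases h : u.toList.foldl (fun c i => if i = ' ' then c + 1 else c) 0 = u.toList.length
  · have h' := h
    rw [String.length_toList] at h'
    have hb : (u != String.ofList (List.replicate u.length ' ')) = false := by
      rw [bne_eq_false_iff_eq, ← String.length_toList]
      exact key.mpr ((pv_count_iff u.toList).mp h)
    simp [h', hb]
  · have h' := h
    rw [String.length_toList] at h'
    have hb : (u != String.ofList (List.replicate u.length ' ')) = true := by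
      rw [bne_iff_ne, ← String.length_toList]
      exact fun he => h ((pv_count_iff u.toList).mpr (key.mp he))
    simp [h', hb]
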